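-- pv_equiv track=rewrite | github.com/DeepPSP/torch_ecg | references/encase/code/util_vote.py | group_gt
-- ===== SOURCE A (Python) =====
-- from collections import Counter
--
-- def group_gt(gt, pids):
--     unique_pids = sorted(list(set(pids)))
--     gt_dic = {k: [] for k in unique_pids}
--     final_gt = []
--     for i in range(len(pids)):
--         gt_dic[pids[i]].append(gt[i])
--     for k, v in gt_dic.items():
--         final_gt.append(Counter(v).most_common(1)[0][0])
--     return final_gt
-- ===== SOURCE B (Python) =====
-- from collections import Counter
-- from itertools import groupby
--
--
-- def group_gt(gt, pids):
--     # sort pairs by pid only (stable), then majority-vote each consecutive run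
--     pairs = sorted(zip(pids, gt), key=lambda p: p[0])
--     return [
--         Counter(g for _, g in grp).most_common(1)[0][0]
--         for _, grp in groupby(pairs, key=lambda p: p[0])
--     ]
-- ===== Notes on version B (the rewrite author's own statement) =====
-- stated objective: idiomatic
-- what changed: Replaces the dict-of-buckets (sorted(set(pids)) keys, index loop appending gt[i]) with a stable sort of the (pid, label) pairs by pid followed by itertools.groupby over consecutive runs, majority-voting each run.
import Mathlib
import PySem

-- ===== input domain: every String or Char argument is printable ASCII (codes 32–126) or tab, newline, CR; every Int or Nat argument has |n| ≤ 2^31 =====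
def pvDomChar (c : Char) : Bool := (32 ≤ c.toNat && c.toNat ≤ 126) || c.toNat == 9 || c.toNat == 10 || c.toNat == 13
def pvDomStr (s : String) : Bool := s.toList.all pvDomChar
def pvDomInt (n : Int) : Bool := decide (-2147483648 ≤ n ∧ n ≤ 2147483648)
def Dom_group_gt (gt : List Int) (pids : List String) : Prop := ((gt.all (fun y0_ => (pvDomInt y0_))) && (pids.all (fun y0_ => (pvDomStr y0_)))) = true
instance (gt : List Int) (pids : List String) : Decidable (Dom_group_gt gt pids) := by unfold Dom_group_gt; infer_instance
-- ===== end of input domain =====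

-- B replaces A's dict-of-buckets with a stable sort of the (pid, label) pairs followed by a
-- consecutive-run grouping (itertools.groupby); same majority vote per group.

-- ===== PORT A =====
-- Counter(v).most_common(1)[0][0]: Counter's items are in first-occurrence order and
-- most_common(1) picks the FIRST item of maximal count (heapq.nlargest is stable), which is
-- exactly PySem.List.max? (first extremal element).  Both Pythons evaluate this same
-- expression, so both ports share this helper.  The `.getD 0` default is never reached:
-- every group the two programs vote on is nonempty.
def counterTop (v : List Int) : Int :=
  ((PySem.List.max? (PySem.Dict.counter v).items (fun p => p.2)).map (fun p => p.1)).getD 0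

def group_gt (gt : List Int) (pids : List String) : List Int :=
  let uniquePids := PySem.List.sorted (PySem.Set.ofList pids) (fun k => k)
  let dic0 := uniquePids.foldl (fun d k => d.insert k ([] : List Int)) PySem.Dict.empty
  let dic := (PySem.List.pyRange 0 (PySem.List.len pids)).foldl
      (fun d i => d.modify (PySem.List.pyGetD pids i "") [] (fun v => v ++ [PySem.List.pyGetD gt i 0])) dic0
  dic.items.foldl (fun acc kv => acc ++ [counterTop kv.2]) []

-- ===== PORT B =====
-- itertools.groupby consumption: scan the sorted pairs once, accumulating the current run
-- (reversed); on a key change emit the finished run's majority vote.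
def goGV (k : String) (cur : List Int) : List (String × Int) → List Int
  | [] => [counterTop cur.reverse]
  | (k', v) :: rest =>
      if k' = k then goGV k (v :: cur) rest
      else counterTop cur.reverse :: goGV k' [v] rest

def groupVotes : List (String × Int) → List Int
  | [] => []
  | (k, v) :: rest => goGV k [v] rest

def group_gt_alt (gt : List Int) (pids : List String) : List Int :=
  groupVotes (PySem.List.sorted (pids.zip gt) (fun p => p.1))

-- ===== PRECONDITION & SPEC =====
-- A indexes gt[i] for every i < len(pids): it raises IndexError when len(gt) < len(pids).
def Pre_group_gt (gt : List Int) (pids : List String) : Prop := pids.length ≤ gt.length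
instance (gt : List Int) (pids : List String) : Decidable (Pre_group_gt gt pids) := by
  unfold Pre_group_gt; infer_instance
def pvWitness_group_gt : List Int × List String := ([1, 0, 1], ["a", "b", "a"])

def Spec_group_gt (gt : List Int) (pids : List String) (out : List Int) : Prop :=
  out = group_gt_alt gt pids
instance (gt : List Int) (pids : List String) (out : List Int) : Decidable (Spec_group_gt gt pids out) := by
  unfold Spec_group_gt; infer_instance

-- ===== CLAIM (what is proved, stated in full; the proofs are below) =====
def Claim_equal_group_gt : Prop := ∀ (gt : List Int) (pids : List String),
  Dom_group_gt gt pids → Pre_group_gt gt pids → Spec_group_gt gt pids (group_gt gt pids)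

-- ===== LEMMAS AND PROOFS =====

-- the per-pid label lists; both characterizations below land on them
def labelsOf (ps : List (String × Int)) (k : String) : List Int :=
  (ps.filter (fun p => p.1 == k)).map (fun p => p.2)

-- indexing loop over range(len(l1)) = loop over zip(l1, l2), Nat level
lemma foldl_range_getD_zip {α β γ : Type} (g : γ → α → β → γ) (da : α) (db : β) :
    ∀ (l1 : List α) (l2 : List β) (init : γ), l1.length ≤ l2.length →
      (List.range l1.length).foldl (fun d i => g d (l1.getD i da) (l2.getD i db)) init
        = (l1.zip l2).foldl (fun d p => g d p.1 p.2) init := by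
  intro l1
  induction l1 with
  | nil => intro l2 init _; simp
  | cons x xs ih =>
      intro l2 init h
      cases l2 with
      | nil => simp at h
      | cons y ys =>
          simp only [List.length_cons, List.range_succ_eq_map, List.foldl_cons, List.foldl_map,
            List.getD_cons_zero, List.zip_cons_cons, List.getD_cons_succ]
          exact ih ys (g init x y) (by simpa using h)

-- the same at the Int/pyRange level, matching port A's loop
lemma foldl_pyRange_zip {γ : Type} (g : γ → String → Int → γ) (pids : List String)
    (gt : List Int) (init : γ) (h : pids.length ≤ gt.length) :
    (PySem.List.pyRange 0 (PySem.List.len pids)).foldl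
        (fun d i => g d (PySem.List.pyGetD pids i "") (PySem.List.pyGetD gt i 0)) init
      = (pids.zip gt).foldl (fun d p => g d p.1 p.2) init := by
  have hlen : PySem.List.len pids = ((pids.length : Nat) : Int) := rfl
  rw [hlen, PySem.List.pyRange_zero_natCast]
  simp only [List.foldl_map, PySem.List.pyGetD_natCast]
  exact foldl_range_getD_zip g "" 0 pids gt init h

-- Set.update adds nothing when every element is already present
lemma set_update_of_forall_mem {s : PySem.Set String} :
    ∀ (l : List String), (∀ x ∈ l, x ∈ s) → PySem.Set.update s l = s := by
  intro l
  induction l with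
  | nil => intro _; rfl
  | cons x xs ih =>
      intro h
      have hx : PySem.Set.add s x = s := by
        simp only [PySem.Set.add, PySem.Set.contains]
        simp [h x (by simp)]
      show List.foldl PySem.Set.add (PySem.Set.add s x) xs = s
      rw [hx]
      exact ih (fun y hy => h y (by simp [hy]))

lemma flatMap_congr_mem {α β : Type} (l : List α) {f g : α → List β}
    (h : ∀ a ∈ l, f a = g a) : l.flatMap f = l.flatMap g := by
  induction l with
  | nil => rfl
  | cons x xs ih =>
      simp only [List.flatMap_cons, h x (by simp), ih (fun a ha => h a (by simp [ha]))]

-- ---- A-side characterization ----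

lemma keys_nodup (pids : List String) :
    (PySem.List.sorted (PySem.Set.ofList pids) (fun k => k)).Nodup :=
  (PySem.List.sorted_ofList_pairwise_lt pids).imp (fun h => ne_of_lt h)

lemma groupA (gt : List Int) (pids : List String) (h : pids.length ≤ gt.length) :
    group_gt gt pids
      = (PySem.List.sorted (PySem.Set.ofList pids) (fun k => k)).map
          (fun k => counterTop (labelsOf (pids.zip gt) k)) := by
  show List.foldl (fun acc kv => acc ++ [counterTop kv.2]) []
      ((List.foldl
          (fun d i => d.modify (PySem.List.pyGetD pids i "") []
            (fun v => v ++ [PySem.List.pyGetD gt i 0]))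
          (List.foldl (fun d k => d.insert k ([] : List Int)) PySem.Dict.empty
            (PySem.List.sorted (PySem.Set.ofList pids) (fun k => k)))
          (PySem.List.pyRange 0 (PySem.List.len pids))).items)
    = _
  set keys := PySem.List.sorted (PySem.Set.ofList pids) (fun k => k) with hkeysdef
  set dic0 := List.foldl (fun d k => d.insert k ([] : List Int)) PySem.Dict.empty keys with hdic0
  have hknd : keys.Nodup := keys_nodup pids
  have hitems0 : dic0.items = keys.map (fun k => (k, ([] : List Int))) := by
    rw [hdic0]
    have := PySem.Dict.items_foldl_insert_fresh (ν := List Int) keys (fun k => k)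
      (fun _ => ([] : List Int)) PySem.Dict.empty (by intro a _; simp) (by simpa using hknd)
    simpa [PySem.Dict.empty] using this
  have hkeys0 : dic0.keys = keys := by
    show dic0.items.map (fun p => p.1) = keys
    rw [hitems0, List.map_map]
    simp [Function.comp_def]
  have hget0 : ∀ k : String, dic0.getD k [] = [] := by
    intro k
    by_cases hk : k ∈ keys
    · have hmem : (k, ([] : List Int)) ∈ dic0.items := by
        rw [hitems0]; exact List.mem_map.mpr ⟨k, hk, rfl⟩
      exact PySem.Dict.getD_of_mem_items dic0 hmem (by rw [hkeys0]; exact hknd) []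
    · refine PySem.Dict.getD_of_not_contains dic0 [] ?_
      rw [← Bool.not_eq_true]
      intro hc
      exact hk (by rw [← hkeys0]; exact (PySem.Dict.contains_iff_mem_keys dic0 k).mp hc)
  have hloop : (PySem.List.pyRange 0 (PySem.List.len pids)).foldl
        (fun d i => d.modify (PySem.List.pyGetD pids i "") []
          (fun v => v ++ [PySem.List.pyGetD gt i 0])) dic0
      = (pids.zip gt).foldl (fun d p => d.modify p.1 [] (fun v => v ++ [p.2])) dic0 :=
    foldl_pyRange_zip (fun d a b => d.modify a [] (fun v => v ++ [b])) pids gt dic0 h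
  rw [hloop]
  set dic := (pids.zip gt).foldl (fun d p => d.modify p.1 [] (fun v => v ++ [p.2])) dic0 with hdic
  have hkeysd : dic.keys = keys := by
    rw [hdic]
    have := PySem.Dict.keys_foldl_modify_key (pids.zip gt) (fun p => p.1)
      ([] : List Int) (fun _ p v => v ++ [p.2]) dic0
    rw [this, hkeys0, List.map_fst_zip h]
    exact set_update_of_forall_mem pids (by
      intro x hx
      rw [hkeysdef, PySem.List.mem_sorted]
      exact (PySem.Set.mem_ofList pids x).mpr hx)
  have hndd : dic.keys.Nodup := by rw [hkeysd]; exact hknd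
  have hgetd : ∀ k : String, dic.getD k [] = labelsOf (pids.zip gt) k := by
    intro k
    rw [hdic, PySem.Dict.getD_foldl_modify_append, hget0, labelsOf]
    simp
  have hitemsd : dic.items = keys.map (fun k => (k, labelsOf (pids.zip gt) k)) := by
    rw [PySem.Dict.items_eq_map_keys dic hndd ([] : List Int), hkeysd]
    apply List.map_congr_left
    intro k _
    rw [hgetd]
  rw [hitemsd]
  have hfin := PySem.List.foldl_append_singleton_eq_map (fun kv : String × List Int => counterTop kv.2)
    (keys.map (fun k => (k, labelsOf (pids.zip gt) k))) []
  simpa using hfin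

-- ---- B-side: stability of the sort ----

lemma insertBy_filter (k : String) (x : String × Int) :
    ∀ (acc : List (String × Int)), acc.Pairwise (fun a b => a.1 ≤ b.1) →
      (PySem.List.insertBy (fun a b => decide (a.1 < b.1)) x acc).filter (fun p => p.1 == k)
        = acc.filter (fun p => p.1 == k) ++ (if x.1 == k then [x] else []) := by
  intro acc
  induction acc with
  | nil =>
      intro _
      by_cases hxk : x.1 = k <;> simp [PySem.List.insertBy, hxk]
  | cons y ys ih =>
      intro hp
      have hys : ys.Pairwise (fun a b => a.1 ≤ b.1) := hp.tail
      have hyall : ∀ z ∈ ys, y.1 ≤ z.1 := (List.pairwise_cons.mp hp).1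
      simp only [PySem.List.insertBy]
      split
      · rename_i hlt
        have hxy : x.1 < y.1 := of_decide_eq_true hlt
        by_cases hxk : x.1 = k
        · have hfil : (y :: ys).filter (fun p => p.1 == k) = [] := by
            apply List.filter_eq_nil_iff.mpr
            intro z hz
            have hyz : y.1 ≤ z.1 := by
              rcases List.mem_cons.mp hz with h | h
              · rw [h]
              · exact hyall z h
            have hk : k < z.1 := lt_of_lt_of_le (hxk ▸ hxy) hyz
            simpa using ne_of_gt hk
          simp [hfil, hxk]
        · simp [List.filter_cons, hxk]
      · rw [List.filter_cons, List.filter_cons, ih hys]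
        by_cases hyk : (y.1 == k) = true <;> simp [hyk]

lemma filter_sorted (k : String) (l : List (String × Int)) :
    (PySem.List.sorted l (fun p => p.1)).filter (fun p => p.1 == k)
      = l.filter (fun p => p.1 == k) := by
  induction l using List.reverseRecOn with
  | nil => rfl
  | append_singleton t x ih =>
      have hsorted : PySem.List.sorted (t ++ [x]) (fun p => p.1)
          = PySem.List.insertBy (fun a b => decide (a.1 < b.1)) x
              (PySem.List.sorted t (fun p => p.1)) := by
        rw [PySem.List.sorted_eq_foldl_insertBy, PySem.List.sorted_eq_foldl_insertBy,
          List.foldl_append]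
        rfl
      rw [hsorted, insertBy_filter k x _ (PySem.List.sorted_pairwise t (fun p => p.1)), ih,
        List.filter_append]
      simp [List.filter_cons]

-- a ≤-sorted list whose minimum key is k splits into its k-run and the rest
lemma filter_split (k : String) :
    ∀ (q : List (String × Int)), q.Pairwise (fun a b => a.1 ≤ b.1) →
      (∀ p ∈ q, k ≤ p.1) →
      q = q.filter (fun p => p.1 == k) ++ q.filter (fun p => !(p.1 == k)) := by
  intro q
  induction q with
  | nil => intro _ _; rfl
  | cons p q' ih =>
      intro hq hmin
      by_cases hpk : (p.1 == k) = true
      · have hrec := ih hq.tail (fun z hz => hmin z (List.mem_cons_of_mem _ hz))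
        calc p :: q'
            = p :: (q'.filter (fun p => p.1 == k) ++ q'.filter (fun p => !(p.1 == k))) := by
              rw [← hrec]
          _ = (p :: q').filter (fun p => p.1 == k) ++ (p :: q').filter (fun p => !(p.1 == k)) := by
              simp [hpk]
      · have hplt : k < p.1 :=
          lt_of_le_of_ne (hmin p (by simp)) (fun hh => hpk (by simp [hh.symm]))
        have hall : ∀ z ∈ q', (z.1 == k) = false := by
          intro z hz
          have h1 : p.1 ≤ z.1 := (List.pairwise_cons.mp hq).1 z hz
          have h2 : k < z.1 := lt_of_lt_of_le hplt h1
          simpa using ne_of_gt h2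
        have hf1 : q'.filter (fun p => p.1 == k) = [] :=
          List.filter_eq_nil_iff.mpr (fun z hz => by simp [hall z hz])
        have hf2 : q'.filter (fun p => !(p.1 == k)) = q' :=
          List.filter_eq_self.mpr (fun z hz => by simp [hall z hz])
        simp [hpk, hf1, hf2]

-- a key-sorted list is the concatenation of its per-key filters, over any strictly
-- increasing key list covering it
lemma sorted_flat :
    ∀ (ks : List String) (q : List (String × Int)),
      ks.Pairwise (· < ·) →
      q.Pairwise (fun a b => a.1 ≤ b.1) →
      (∀ p ∈ q, p.1 ∈ ks) →
      q = ks.flatMap (fun k => q.filter (fun p => p.1 == k)) := by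
  intro ks
  induction ks with
  | nil =>
      intro q _ _ hmem
      cases q with
      | nil => rfl
      | cons p _ => exact absurd (hmem p (by simp)) (by simp)
  | cons k ks' ih =>
      intro q hks hq hmem
      have hklt : ∀ k' ∈ ks', k < k' := (List.pairwise_cons.mp hks).1
      have hmin : ∀ p ∈ q, k ≤ p.1 := by
        intro p hp
        rcases List.mem_cons.mp (hmem p hp) with hh | hh
        · exact le_of_eq hh.symm
        · exact le_of_lt (hklt p.1 hh)
      have hsplit := filter_split k q hq hmin
      set r := q.filter (fun p => !(p.1 == k)) with hrdef
      have hr : ∀ k' ∈ ks',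
          r.filter (fun p => p.1 == k') = q.filter (fun p => p.1 == k') := by
        intro k' hk'
        rw [hrdef, List.filter_filter]
        apply List.filter_congr
        intro p _
        by_cases hp : (p.1 == k') = true
        · have hpk' : p.1 = k' := by simpa using hp
          have hne : (p.1 == k) = false := by
            simp only [beq_eq_false_iff_ne, ne_eq, hpk']
            exact fun hkk => absurd (hklt k' hk') (by rw [hkk]; exact lt_irrefl _)
          simp [hp, hne]
        · simp [hp]
      have hrec : r = ks'.flatMap (fun k' => r.filter (fun p => p.1 == k')) := by
        refine ih r hks.tail (List.Pairwise.sublist List.filter_sublist hq) ?_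
        intro p hp
        have hpq : p ∈ q := List.mem_of_mem_filter hp
        have hpne : (p.1 == k) = false := by
          have := List.of_mem_filter hp
          simpa using this
        rcases List.mem_cons.mp (hmem p hpq) with hh | hh
        · exact absurd hh (by simpa using hpne)
        · exact hh
      calc q = q.filter (fun p => p.1 == k) ++ r := hsplit
        _ = q.filter (fun p => p.1 == k)
              ++ ks'.flatMap (fun k' => q.filter (fun p => p.1 == k')) := by
            rw [hrec, flatMap_congr_mem ks' hr]
        _ = (k :: ks').flatMap (fun k' => q.filter (fun p => p.1 == k')) := by
            rw [List.flatMap_cons]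

-- ---- B-side: the groupby scan over concatenated key blocks ----

lemma goGV_append (k : String) (rest : List (String × Int)) :
    ∀ (blk : List (String × Int)) (cur : List Int), (∀ p ∈ blk, p.1 = k) →
      goGV k cur (blk ++ rest) = goGV k ((blk.map (fun p => p.2)).reverse ++ cur) rest := by
  intro blk
  induction blk with
  | nil => intro cur _; simp
  | cons p blk' ih =>
      intro cur hblk
      obtain ⟨k', v⟩ := p
      have hk' : k' = k := hblk (k', v) (by simp)
      rw [List.cons_append]
      show goGV k cur ((k', v) :: (blk' ++ rest)) = _
      rw [goGV, if_pos hk']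
      rw [ih (v :: cur) (fun z hz => hblk z (by simp [hz]))]
      simp

lemma goGV_flat :
    ∀ (ks : List String) (f : String → List (String × Int)) (k : String) (cur : List Int),
      ks.Nodup →
      (∀ k' ∈ ks, f k' ≠ []) →
      (∀ k' ∈ ks, ∀ p ∈ f k', p.1 = k') →
      (∀ k' ∈ ks, k' ≠ k) →
      goGV k cur (ks.flatMap f)
        = counterTop cur.reverse
            :: ks.map (fun k' => counterTop ((f k').map (fun p => p.2))) := by
  intro ks
  induction ks with
  | nil => intro f k cur _ _ _ _; simp [goGV]
  | cons k1 ks' ih =>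
      intro f k cur hnd hne hkey hdiff
      obtain ⟨p0, blk', hfk⟩ : ∃ p0 blk', f k1 = p0 :: blk' := by
        cases hfkc : f k1 with
        | nil => exact absurd hfkc (hne k1 (by simp))
        | cons a b => exact ⟨a, b, rfl⟩
      obtain ⟨k0, v⟩ := p0
      have hk0 : k0 = k1 := hkey k1 (by simp) (k0, v) (by rw [hfk]; simp)
      have hblk' : ∀ p ∈ blk', p.1 = k1 :=
        fun p hp => hkey k1 (by simp) p (by rw [hfk]; simp [hp])
      rw [List.flatMap_cons, hfk, hk0, List.cons_append]
      show goGV k cur ((k1, v) :: (blk' ++ ks'.flatMap f)) = _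
      rw [goGV, if_neg (Ne.symm (hdiff k1 (by simp))).symm]
      · rw [goGV_append k1 (ks'.flatMap f) blk' [v] hblk']
        rw [ih f k1 ((blk'.map (fun p => p.2)).reverse ++ [v]) (List.nodup_cons.mp hnd).2
          (fun a ha => hne a (by simp [ha])) (fun a ha => hkey a (by simp [ha]))
          (fun a ha => fun hak => (List.nodup_cons.mp hnd).1 (hak ▸ ha))]
        rw [List.map_cons, hfk]
        simp

lemma groupVotes_flat (ks : List String) (f : String → List (String × Int))
    (hnd : ks.Nodup) (hne : ∀ k ∈ ks, f k ≠ []) (hkey : ∀ k ∈ ks, ∀ p ∈ f k, p.1 = k) :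
    groupVotes (ks.flatMap f) = ks.map (fun k => counterTop ((f k).map (fun p => p.2))) := by
  cases ks with
  | nil => simp [groupVotes]
  | cons k ks' =>
      obtain ⟨p0, blk', hfk⟩ : ∃ p0 blk', f k = p0 :: blk' := by
        cases hfkc : f k with
        | nil => exact absurd hfkc (hne k (by simp))
        | cons a b => exact ⟨a, b, rfl⟩
      obtain ⟨k0, v⟩ := p0
      have hk0 : k0 = k := hkey k (by simp) (k0, v) (by rw [hfk]; simp)
      have hblk' : ∀ p ∈ blk', p.1 = k :=
        fun p hp => hkey k (by simp) p (by rw [hfk]; simp [hp])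
      rw [List.flatMap_cons, hfk, hk0, List.cons_append]
      show groupVotes ((k, v) :: (blk' ++ ks'.flatMap f)) = _
      rw [groupVotes]
      rw [goGV_append k (ks'.flatMap f) blk' [v] hblk']
      rw [goGV_flat ks' f k ((blk'.map (fun p => p.2)).reverse ++ [v]) (List.nodup_cons.mp hnd).2
        (fun a ha => hne a (by simp [ha])) (fun a ha => hkey a (by simp [ha]))
        (fun a ha => fun hak => (List.nodup_cons.mp hnd).1 (hak ▸ ha))]
      rw [List.map_cons, hfk]
      simp

lemma groupB (gt : List Int) (pids : List String) (h : pids.length ≤ gt.length) :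
    group_gt_alt gt pids
      = (PySem.List.sorted (PySem.Set.ofList pids) (fun k => k)).map
          (fun k => counterTop (labelsOf (pids.zip gt) k)) := by
  unfold group_gt_alt
  set ks := PySem.List.sorted (PySem.Set.ofList pids) (fun k => k) with hksdef
  set q := PySem.List.sorted (pids.zip gt) (fun p => p.1) with hqdef
  have hkslt : ks.Pairwise (· < ·) := PySem.List.sorted_ofList_pairwise_lt pids
  have hmem : ∀ p ∈ q, p.1 ∈ ks := by
    intro p hp
    rw [hqdef, PySem.List.mem_sorted] at hp
    have hp1 : p.1 ∈ pids := by
      rw [← List.map_fst_zip h]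
      exact List.mem_map.mpr ⟨p, hp, rfl⟩
    rw [hksdef, PySem.List.mem_sorted]
    exact (PySem.Set.mem_ofList pids p.1).mpr hp1
  have hflat : q = ks.flatMap (fun k => q.filter (fun p => p.1 == k)) :=
    sorted_flat ks q hkslt (PySem.List.sorted_pairwise (pids.zip gt) (fun p => p.1)) hmem
  have hne : ∀ k ∈ ks, q.filter (fun p => p.1 == k) ≠ [] := by
    intro k hk
    have hkp : k ∈ pids := by
      rw [hksdef, PySem.List.mem_sorted] at hk
      exact (PySem.Set.mem_ofList pids k).mp hk
    rw [← List.map_fst_zip h] at hkp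
    rcases List.mem_map.mp hkp with ⟨p, hp, hpk⟩
    have hpq : p ∈ q := by rw [hqdef, PySem.List.mem_sorted]; exact hp
    exact List.ne_nil_of_mem (List.mem_filter.mpr ⟨hpq, by simp [hpk]⟩)
  have hkey : ∀ k ∈ ks, ∀ p ∈ q.filter (fun p => p.1 == k), p.1 = k := by
    intro k _ p hp
    have := List.of_mem_filter hp
    simpa using this
  have hnd : ks.Nodup := hkslt.imp (fun hlt => ne_of_lt hlt)
  calc groupVotes q
      = groupVotes (ks.flatMap (fun k => q.filter (fun p => p.1 == k))) := by rw [← hflat]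
    _ = ks.map (fun k => counterTop ((q.filter (fun p => p.1 == k)).map (fun p => p.2))) :=
        groupVotes_flat ks _ hnd hne hkey
    _ = ks.map (fun k => counterTop (labelsOf (pids.zip gt) k)) := by
        apply List.map_congr_left
        intro k _
        rw [hqdef, filter_sorted k (pids.zip gt), labelsOf]

-- ===== VERDICT (by name: the statement is the Claim_ definition above) =====
theorem group_gt_spec : Claim_equal_group_gt := by
  intro gt pids _ hpre
  show group_gt gt pids = group_gt_alt gt pids
  rw [groupA gt pids hpre, groupB gt pids hpre]
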